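-- pv_equiv track=rewrite | github.com/asjian/Jane-Street-Puzzles | June 2024/simulated_annealing.py | make_adjset
-- ===== SOURCE A (Python) =====
-- from collections import Counter, defaultdict
--
-- def make_adjset(grid):
--     offset = ord('a')
--     adj = [defaultdict(list) for k in range(25)]
--     for i in range(25):
--         x, y = i//5, i%5
--         for dx in range(-1, 2):
--             for dy in range(-1, 2):
--                 if not (dx == 0 and dy == 0) and x+dx > -1 and x+dx < 5 and y+dy > -1 and y+dy < 5:
--                     adj[i][grid[x+dx][y+dy]].append(5*(x+dx) + (y+dy))
--     return adj
-- ===== SOURCE B (Python) =====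
-- from collections import defaultdict
--
-- def make_adjset(grid):
--     adj = []
--     for i in range(25):
--         xi, yi = i // 5, i % 5
--         d = defaultdict(list)
--         for j in range(25):
--             xj, yj = j // 5, j % 5
--             if i != j and abs(xi - xj) <= 1 and abs(yi - yj) <= 1:
--                 d[grid[xj][yj]].append(j)
--         adj.append(d)
--     return adj
-- ===== Notes on version B (the rewrite author's own statement) =====
-- stated objective: alternative
-- what changed: Replaces A's fixed 3x3 offset (dx,dy) enumeration with an all-pairs scan over the 25 flat indices filtered by a Chebyshev-distance-1 test; j ascends so per-letter lists and dict key order are identical.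
import Mathlib
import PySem

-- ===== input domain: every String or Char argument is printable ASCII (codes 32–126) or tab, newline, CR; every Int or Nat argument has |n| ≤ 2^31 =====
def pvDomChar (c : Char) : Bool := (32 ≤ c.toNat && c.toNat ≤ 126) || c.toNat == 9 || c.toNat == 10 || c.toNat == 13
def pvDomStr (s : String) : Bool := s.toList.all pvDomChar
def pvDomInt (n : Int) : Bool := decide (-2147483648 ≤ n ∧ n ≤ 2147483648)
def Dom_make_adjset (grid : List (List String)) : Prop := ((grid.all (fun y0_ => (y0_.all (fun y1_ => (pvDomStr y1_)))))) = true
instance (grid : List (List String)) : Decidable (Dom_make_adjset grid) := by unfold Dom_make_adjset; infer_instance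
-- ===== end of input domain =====

-- B replaces A's fixed 3x3 (dx,dy) offset enumeration with an all-pairs scan of the 25
-- flat indices filtered by a Chebyshev-distance-1 test (same cost class; objective: alternative).


-- ===== PORT A =====
-- adj[i] = f(adj[i]): Python's list element update (out-of-range index leaves the list
-- unchanged; Pre_ keeps every index used in range)
def pvSetIdx {α : Type} (xs : List α) (i : Nat) (f : α → α) : List α :=
  match xs, i with
  | [], _ => []
  | x :: r, 0 => f x :: r
  | x :: r, n+1 => x :: pvSetIdx r n f

-- grid[x][y]: Pre_ guarantees both indices (always in [0,5)) are in range, so the pyGetD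
-- defaults are never taken inside Pre_; outside Pre_ Python raises IndexError.
def pvCellA (grid : List (List String)) (x y : Int) : String :=
  PySem.List.pyGetD (PySem.List.pyGetD grid x []) y ""

-- body of A's 'for i in range(25)' loop
def pvLoopA (grid : List (List String)) (adj : List (PySem.Dict String (List Int))) (i : Int) :
    List (PySem.Dict String (List Int)) :=
  let x := PySem.Int.floordiv i 5
  let y := PySem.Int.mod i 5
  (PySem.List.pyRange (-1) 2 1).foldl (fun adj dx =>
    (PySem.List.pyRange (-1) 2 1).foldl (fun adj dy =>
      if ¬(dx = 0 ∧ dy = 0) ∧ x + dx > -1 ∧ x + dx < 5 ∧ y + dy > -1 ∧ y + dy < 5 then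
        pvSetIdx adj i.toNat (fun d =>
          d.modify (pvCellA grid (x + dx) (y + dy)) [] (· ++ [5 * (x + dx) + (y + dy)]))
      else adj) adj) adj

def make_adjset (grid : List (List String)) : List (List (String × List Int)) :=
  ((PySem.List.pyRange 0 25 1).foldl (pvLoopA grid)
    ((PySem.List.pyRange 0 25 1).map (fun _ => PySem.Dict.empty))).map (·.items)

-- ===== PORT B =====
-- body of B's 'for j in range(25)' loop
def pvLoopB (grid : List (List String)) (i : Int) (d : PySem.Dict String (List Int)) (j : Int) :
    PySem.Dict String (List Int) :=
  let xj := PySem.Int.floordiv j 5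
  let yj := PySem.Int.mod j 5
  if i ≠ j ∧ |PySem.Int.floordiv i 5 - xj| ≤ 1 ∧ |PySem.Int.mod i 5 - yj| ≤ 1 then
    d.modify (PySem.List.pyGetD (PySem.List.pyGetD grid xj []) yj "") [] (· ++ [j])
  else d

def make_adjset_alt (grid : List (List String)) : List (List (String × List Int)) :=
  (PySem.List.pyRange 0 25 1).map (fun i =>
    ((PySem.List.pyRange 0 25 1).foldl (pvLoopB grid i) PySem.Dict.empty).items)

-- ===== PRECONDITION & SPEC =====
-- Python A indexes grid[x][y] for every x,y in 0..4 and raises IndexError unless the grid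
-- has at least 5 rows whose first 5 each have at least 5 entries; rows/cells beyond 5 are unused.
def Pre_make_adjset (grid : List (List String)) : Prop :=
  5 ≤ grid.length ∧ ∀ r ∈ grid.take 5, 5 ≤ r.length
instance (grid : List (List String)) : Decidable (Pre_make_adjset grid) := by
  unfold Pre_make_adjset; infer_instance

def pvWitness_make_adjset : List (List String) :=
  [["a","b","c","d","e"],["f","g","h","i","j"],["k","l","m","n","o"],
   ["p","q","r","s","t"],["u","v","w","x","y"]]

def Spec_make_adjset (grid : List (List String)) (out : List (List (String × List Int))) : Prop := out = make_adjset_alt grid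
instance (grid : List (List String)) (out : List (List (String × List Int))) : Decidable (Spec_make_adjset grid out) := by unfold Spec_make_adjset; infer_instance

-- ===== CLAIM (what is proved, stated in full; the proofs are below) =====
def Claim_equal_make_adjset : Prop := ∀ (grid : List (List String)), Dom_make_adjset grid → Pre_make_adjset grid → Spec_make_adjset grid (make_adjset grid)

-- ===== LEMMAS AND PROOFS =====
lemma pvSetIdx_id {α : Type} (xs : List α) (n : Nat) : pvSetIdx xs n (fun x => x) = xs := by
  induction xs generalizing n with
  | nil => rfl
  | cons x r ih => cases n with
    | zero => rfl
    | succ m => simp [pvSetIdx, ih]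

lemma pvSetIdx_ite {α : Type} (c : Prop) [Decidable c] (xs : List α) (n : Nat) (f : α → α) :
    (if c then pvSetIdx xs n f else xs) = pvSetIdx xs n (fun x => if c then f x else x) := by
  split
  · rfl
  · exact (pvSetIdx_id xs n).symm

lemma pvSetIdx_comp {α : Type} (xs : List α) (n : Nat) (f g : α → α) :
    pvSetIdx (pvSetIdx xs n f) n g = pvSetIdx xs n (fun x => g (f x)) := by
  induction xs generalizing n with
  | nil => rfl
  | cons x r ih => cases n with
    | zero => rfl
    | succ m => simp [pvSetIdx, ih]

lemma pvSetIdx_append_len {α : Type} (xs : List α) (y : α) (ys : List α) (f : α → α) :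
    pvSetIdx (xs ++ y :: ys) xs.length f = xs ++ f y :: ys := by
  induction xs with
  | nil => rfl
  | cons x r ih => simp [pvSetIdx, ih]

-- the chain of dict updates A performs at cell i (pvLoopA with the list update factored out)
def pvChainA (grid : List (List String)) (i : Int) (d0 : PySem.Dict String (List Int)) :
    PySem.Dict String (List Int) :=
  let x := PySem.Int.floordiv i 5
  let y := PySem.Int.mod i 5
  (PySem.List.pyRange (-1) 2 1).foldl (fun d dx =>
    (PySem.List.pyRange (-1) 2 1).foldl (fun d dy =>
      if ¬(dx = 0 ∧ dy = 0) ∧ x + dx > -1 ∧ x + dx < 5 ∧ y + dy > -1 ∧ y + dy < 5 then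
        d.modify (pvCellA grid (x + dx) (y + dy)) [] (· ++ [5 * (x + dx) + (y + dy)])
      else d) d) d0

lemma r3_lit : PySem.List.pyRange (-1) 2 1 = [-1, 0, 1] := by decide

lemma pvLoopA_eq (grid : List (List String)) (adj : List (PySem.Dict String (List Int))) (i : Int) :
    pvLoopA grid adj i = pvSetIdx adj i.toNat (pvChainA grid i) := by
  simp only [pvLoopA, r3_lit, List.foldl_cons, List.foldl_nil, pvSetIdx_ite, pvSetIdx_comp]
  refine congrArg _ (funext fun d => ?_)
  simp only [pvChainA, r3_lit, List.foldl_cons, List.foldl_nil]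

lemma pvLoopA_fun_eq (grid : List (List String)) :
    pvLoopA grid = fun adj i => pvSetIdx adj i.toNat (pvChainA grid i) :=
  funext fun adj => funext fun i => pvLoopA_eq grid adj i

lemma foldl_range_pvSetIdx_aux {α : Type} (F : Nat → α → α) (x : α) :
    ∀ (n : Nat) (ys : List α),
      (List.range n).foldl (fun acc k => pvSetIdx acc k (F k)) (List.replicate n x ++ ys)
        = (List.range n).map (fun k => F k x) ++ ys := by
  intro n
  induction n with
  | zero => intro ys; rfl
  | succ m ih =>
    intro ys
    rw [List.range_succ, List.replicate_succ', List.foldl_append, List.append_assoc,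
      List.singleton_append, ih (x :: ys)]
    simp only [List.foldl_cons, List.foldl_nil]
    have h := pvSetIdx_append_len ((List.range m).map (fun k => F k x)) x ys (F m)
    simp only [List.length_map, List.length_range] at h
    rw [h]
    simp

lemma foldl_range_pvSetIdx {α : Type} (F : Nat → α → α) (x : α) (n : Nat) :
    (List.range n).foldl (fun acc k => pvSetIdx acc k (F k)) (List.replicate n x)
      = (List.range n).map (fun k => F k x) := by
  have h := foldl_range_pvSetIdx_aux F x n []
  simpa using h

lemma r25_cast : PySem.List.pyRange 0 25 1 = (List.range 25).map Int.ofNat := by decide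

lemma outerA (grid : List (List String)) :
    (PySem.List.pyRange 0 25 1).foldl (pvLoopA grid)
        ((PySem.List.pyRange 0 25 1).map (fun _ => PySem.Dict.empty))
      = (PySem.List.pyRange 0 25 1).map (fun i => pvChainA grid i PySem.Dict.empty) := by
  rw [pvLoopA_fun_eq grid, r25_cast, List.foldl_map]
  have hinit : ((List.range 25).map Int.ofNat).map
      (fun _ => (PySem.Dict.empty : PySem.Dict String (List Int)))
      = List.replicate 25 PySem.Dict.empty := by rfl
  rw [hinit]
  have hb : (fun (acc : List (PySem.Dict String (List Int))) (k : Nat) =>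
      pvSetIdx acc (Int.ofNat k).toNat (pvChainA grid (Int.ofNat k)))
      = fun acc k => pvSetIdx acc k (pvChainA grid (Int.ofNat k)) := by
    funext acc k; rfl
  rw [hb, foldl_range_pvSetIdx, List.map_map]
  rfl

-- both loop bodies perform the same dict update, keyed by the flat index j of the neighbour
def pvStep (grid : List (List String)) (d : PySem.Dict String (List Int)) (j : Int) :
    PySem.Dict String (List Int) :=
  d.modify (pvCellA grid (PySem.Int.floordiv j 5) (PySem.Int.mod j 5)) [] (· ++ [j])

-- the neighbour flat indices A visits at cell i, in visit order
def pvNbrA (i : Int) : List Int :=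
  let x := PySem.Int.floordiv i 5
  let y := PySem.Int.mod i 5
  (PySem.List.pyRange (-1) 2 1).flatMap (fun dx =>
    ((PySem.List.pyRange (-1) 2 1).filter (fun dy =>
      decide (¬(dx = 0 ∧ dy = 0) ∧ x + dx > -1 ∧ x + dx < 5 ∧ y + dy > -1 ∧ y + dy < 5))).map
        (fun dy => 5 * (x + dx) + (y + dy)))

-- the neighbour flat indices B visits at cell i, in visit order
def pvNbrB (i : Int) : List Int :=
  (PySem.List.pyRange 0 25 1).filter (fun j =>
    decide (i ≠ j ∧ |PySem.Int.floordiv i 5 - PySem.Int.floordiv j 5| ≤ 1 ∧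
      |PySem.Int.mod i 5 - PySem.Int.mod j 5| ≤ 1))

lemma foldl_ite_filter {β δ : Type} (l : List β) (c : β → Prop) [DecidablePred c]
    (F : δ → β → δ) (d : δ) :
    l.foldl (fun d b => if c b then F d b else d) d
      = (l.filter (fun b => decide (c b))).foldl F d := by
  induction l generalizing d with
  | nil => rfl
  | cons b t ih => by_cases h : c b <;> simp [h, ih]

lemma foldl_foldl_flatMap {β γ δ : Type} (l : List β) (g : β → List γ) (F : δ → γ → δ) (d : δ) :
    (l.flatMap g).foldl F d = l.foldl (fun d b => (g b).foldl F d) d := by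
  induction l generalizing d with
  | nil => rfl
  | cons b t ih => simp [List.flatMap_cons, List.foldl_append, ih]

lemma fd5 (a b : Int) (hb : 0 ≤ b) (hb5 : b < 5) :
    PySem.Int.floordiv (5 * a + b) 5 = a ∧ PySem.Int.mod (5 * a + b) 5 = b := by
  have h1 := PySem.Int.floordiv_mul_add_mod (5 * a + b) 5
  have h2 := PySem.Int.mod_nonneg (5 * a + b) (b := 5) (by norm_num)
  have h3 := PySem.Int.mod_lt (5 * a + b) (b := 5) (by norm_num)
  constructor <;> omega

lemma pvChainA_fold (grid : List (List String)) (i : Int) (d : PySem.Dict String (List Int)) :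
    pvChainA grid i d = (pvNbrA i).foldl (pvStep grid) d := by
  simp only [pvChainA, pvNbrA]
  rw [foldl_foldl_flatMap]
  apply PySem.List.foldl_congr_mem
  intro acc dx _
  rw [foldl_ite_filter, List.foldl_map]
  apply PySem.List.foldl_congr_mem
  intro acc2 dy hdy
  have hc := of_decide_eq_true (List.mem_filter.mp hdy).2
  obtain ⟨-, h1, h2, h3, h4⟩ := hc
  have hfm := fd5 (PySem.Int.floordiv i 5 + dx) (PySem.Int.mod i 5 + dy) (by omega) (by omega)
  simp only [pvStep, hfm.1, hfm.2]

lemma pvLoopB_fold (grid : List (List String)) (i : Int) (d : PySem.Dict String (List Int)) :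
    (PySem.List.pyRange 0 25 1).foldl (pvLoopB grid i) d = (pvNbrB i).foldl (pvStep grid) d := by
  have h : ∀ (d : PySem.Dict String (List Int)) (j : Int),
      pvLoopB grid i d j =
        if i ≠ j ∧ |PySem.Int.floordiv i 5 - PySem.Int.floordiv j 5| ≤ 1 ∧
            |PySem.Int.mod i 5 - PySem.Int.mod j 5| ≤ 1 then
          pvStep grid d j
        else d := fun d j => rfl
  exact (PySem.List.foldl_congr_mem _ _ _ _ (fun acc j _ => h acc j)).trans (foldl_ite_filter _ _ _ _)

lemma nbr_eq : ∀ i ∈ PySem.List.pyRange 0 25 1, pvNbrA i = pvNbrB i := by decide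

-- ===== VERDICT (by name: the statement is the Claim_ definition above) =====
theorem make_adjset_spec : Claim_equal_make_adjset := by
  intro grid _ _
  show make_adjset grid = make_adjset_alt grid
  simp only [make_adjset, make_adjset_alt, outerA, List.map_map]
  refine List.map_congr_left ?_
  intro i hi
  simp only [Function.comp]
  rw [pvChainA_fold, pvLoopB_fold, nbr_eq i hi]
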